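-- pv_equiv track=rewrite | github.com/Little-LittleProgrammer/ai-marketplace | skills/feishu-doc/scripts/analyze_pdf.py | trim_empty_edge_columns
-- ===== SOURCE A (Python) =====
-- def trim_empty_edge_columns(rows):
--     if not rows:
--         return rows
--
--     column_count = max(len(row) for row in rows)
--     normalized_rows = [row + [""] * (column_count - len(row)) for row in rows]
--
--     left = 0
--     right = column_count - 1
--     while left < column_count and all(not row[left] for row in normalized_rows):
--         left += 1
--     while right >= left and all(not row[right] for row in normalized_rows):
--         right -= 1
--
--     if left > right:
--         return []
--     return [row[left : right + 1] for row in normalized_rows]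
-- ===== SOURCE B (Python) =====
-- def trim_empty_edge_columns(rows):
--     if not rows:
--         return rows
--
--     column_count = max(len(row) for row in rows)
--     normalized_rows = [row + [""] * (column_count - len(row)) for row in rows]
--
--     nonempty = [j for j in range(column_count)
--                 if any(row[j] for row in normalized_rows)]
--     if not nonempty:
--         return []
--     left, right = nonempty[0], nonempty[-1]
--     return [row[left : right + 1] for row in normalized_rows]
-- ===== Notes on version B (the rewrite author's own statement) =====
-- stated objective: simpler
-- what changed: Replaces the two inward edge-scanning while loops with a single pass that collects the non-empty column indices and takes their min (first) and max (last).
import Mathlib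
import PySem

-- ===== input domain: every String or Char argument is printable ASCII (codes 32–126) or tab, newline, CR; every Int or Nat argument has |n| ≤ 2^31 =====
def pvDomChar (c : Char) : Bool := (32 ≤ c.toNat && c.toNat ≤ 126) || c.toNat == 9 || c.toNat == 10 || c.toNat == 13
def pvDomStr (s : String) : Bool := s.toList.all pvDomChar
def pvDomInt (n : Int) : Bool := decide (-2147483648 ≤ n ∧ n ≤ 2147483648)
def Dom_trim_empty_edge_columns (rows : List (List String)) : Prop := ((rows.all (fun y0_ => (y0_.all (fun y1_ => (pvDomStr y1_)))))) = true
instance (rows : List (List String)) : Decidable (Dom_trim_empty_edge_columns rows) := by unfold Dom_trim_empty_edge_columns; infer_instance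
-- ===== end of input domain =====

-- B replaces A's two inward edge-scanning while loops with one pass collecting the
-- non-empty column indices and slicing from their first to their last (objective: simpler).

-- ===== PORT A =====
-- `while left < column_count and all(not row[left] for row in normalized_rows): left += 1`
-- (row[left] is always in range since every normalized row has length column_count, so getD is exact)
def pvFindLeft (norm : List (List String)) (cc : Nat) (l : Nat) : Nat :=
  if l < cc ∧ norm.all (fun row => row.getD l "" == "") then pvFindLeft norm cc (l + 1) else l
termination_by cc - l
decreasing_by omega

-- `while right >= left and all(not row[right] for row in normalized_rows): right -= 1`
-- (row[right] is always in range when the guard holds, so .toNat/getD is exact)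
def pvFindRight (norm : List (List String)) (l : Nat) (r : Int) : Int :=
  if (l : Int) ≤ r ∧ norm.all (fun row => row.getD r.toNat "" == "") then pvFindRight norm l (r - 1) else r
termination_by (r + 1 - l).toNat
decreasing_by omega

def trim_empty_edge_columns (rows : List (List String)) : List (List String) :=
  if rows = [] then rows else
    let cc := (rows.map List.length).foldl Nat.max 0   -- max(len(row) for row in rows)
    let norm := rows.map (fun row => row ++ List.replicate (cc - row.length) "")
    let left := pvFindLeft norm cc 0
    let right := pvFindRight norm left ((cc : Int) - 1)
    if right < (left : Int) then []
    else norm.map (fun row => PySem.List.slice row (some (left : Int)) (some (right + 1)))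

-- ===== PORT B =====
def trim_empty_edge_columns_alt (rows : List (List String)) : List (List String) :=
  if rows = [] then rows else
    let cc := (rows.map List.length).foldl Nat.max 0
    let norm := rows.map (fun row => row ++ List.replicate (cc - row.length) "")
    let nonempty := (List.range cc).filter (fun j => norm.any (fun row => row.getD j "" != ""))
    match nonempty with
    | [] => []
    | j :: _ =>
        let left := j
        let right := nonempty.getLastD j
        norm.map (fun row => PySem.List.slice row (some (left : Int)) (some ((right : Int) + 1)))

-- ===== PRECONDITION & SPEC =====
def Spec_trim_empty_edge_columns (rows : List (List String)) (out : List (List String)) : Prop := out = trim_empty_edge_columns_alt rows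
instance (rows : List (List String)) (out : List (List String)) : Decidable (Spec_trim_empty_edge_columns rows out) := by unfold Spec_trim_empty_edge_columns; infer_instance

-- ===== CLAIM (what is proved, stated in full; the proofs are below) =====
def Claim_equal_trim_empty_edge_columns : Prop := ∀ (rows : List (List String)), Dom_trim_empty_edge_columns rows → Spec_trim_empty_edge_columns rows (trim_empty_edge_columns rows)

-- ===== LEMMAS AND PROOFS =====

theorem pvAny_eq_not_all (norm : List (List String)) (j : Nat) :
    (norm.any (fun row => row.getD j "" != "")) = !(norm.all (fun row => row.getD j "" == "")) := by
  induction norm with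
  | nil => rfl
  | cons r t ih =>
    simp only [bne] at ih ⊢
    rw [List.any_cons, List.all_cons, Bool.not_and, ih]

def pvColNonempty (norm : List (List String)) (j : Nat) : Bool :=
  !(norm.all (fun row => row.getD j "" == ""))

theorem pvFindLeft_spec (norm : List (List String)) (cc : Nat) :
    ∀ l, l ≤ cc →
      pvFindLeft norm cc l = ((List.range' l (cc - l)).filter (pvColNonempty norm)).headD cc := by
  intro l hl
  induction l using pvFindLeft.induct norm cc with
  | case1 l h ih =>
    rw [pvFindLeft, if_pos h, ih h.1]
    have hfe : (List.range' l (cc - l)).filter (pvColNonempty norm)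
        = (List.range' (l+1) (cc - (l+1))).filter (pvColNonempty norm) := by
      have hp : pvColNonempty norm l = false := by rw [pvColNonempty, h.2]; rfl
      rw [show cc - l = (cc - (l+1)) + 1 by omega, List.range'_succ, List.filter_cons, hp,
        if_neg (by simp)]
    rw [hfe]
  | case2 l h =>
    rw [pvFindLeft, if_neg h]
    rcases Nat.lt_or_ge l cc with hlt | hge
    · have hall : (norm.all (fun row => row.getD l "" == "")) = false := by
        rcases Bool.eq_false_or_eq_true (norm.all (fun row => row.getD l "" == "")) with ht | hf
        · exact absurd ⟨hlt, ht⟩ h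
        · exact hf
      have hp : pvColNonempty norm l = true := by rw [pvColNonempty, hall]; rfl
      rw [show cc - l = (cc - (l+1)) + 1 by omega, List.range'_succ, List.filter_cons, hp,
        if_pos rfl, List.headD_cons]
    · have hle : l = cc := by omega
      subst hle
      simp

theorem pvFindRight_spec (norm : List (List String)) (l : Nat) :
    ∀ r : Int, (l : Int) - 1 ≤ r →
      pvFindRight norm l r =
        (if ((List.range' l ((r + 1 - l).toNat)).filter (pvColNonempty norm)) = []
         then (l : Int) - 1
         else ((((List.range' l ((r + 1 - l).toNat)).filter (pvColNonempty norm)).getLastD 0 : Nat) : Int)) := by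
  intro r hr
  induction r using pvFindRight.induct norm l with
  | case1 r h ih =>
    rw [pvFindRight, if_pos h, ih (by omega)]
    have hfe : (List.range' l ((r + 1 - l).toNat)).filter (pvColNonempty norm)
        = (List.range' l ((r - 1 + 1 - l).toNat)).filter (pvColNonempty norm) := by
      rw [show (r + 1 - l).toNat = (r - 1 + 1 - l).toNat + 1 by omega, List.range'_1_concat,
        show l + (r - 1 + 1 - l).toNat = r.toNat by omega, List.filter_append,
        show List.filter (pvColNonempty norm) [r.toNat] = [] by
          rw [List.filter_cons, show pvColNonempty norm r.toNat = false by
            rw [pvColNonempty, h.2]; rfl, if_neg (by simp), List.filter_nil],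
        List.append_nil]
    rw [hfe]
  | case2 r h =>
    rw [pvFindRight, if_neg h]
    rcases Int.lt_or_le r l with hlt | hge
    · have h0 : (List.range' l ((r + 1 - l).toNat)).filter (pvColNonempty norm) = [] := by
        rw [show (r + 1 - l).toNat = 0 by omega]; rfl
      rw [h0, if_pos rfl]
      omega
    · have hall : (norm.all (fun row => row.getD r.toNat "" == "")) = false := by
        rcases Bool.eq_false_or_eq_true (norm.all (fun row => row.getD r.toNat "" == "")) with ht | hf
        · exact absurd ⟨hge, ht⟩ h
        · exact hf
      have hsplit : (List.range' l ((r + 1 - l).toNat)).filter (pvColNonempty norm)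
          = (List.range' l ((r - 1 + 1 - l).toNat)).filter (pvColNonempty norm) ++ [r.toNat] := by
        rw [show (r + 1 - l).toNat = (r - 1 + 1 - l).toNat + 1 by omega, List.range'_1_concat,
          show l + (r - 1 + 1 - l).toNat = r.toNat by omega, List.filter_append,
          show List.filter (pvColNonempty norm) [r.toNat] = [r.toNat] by
            rw [List.filter_cons, show pvColNonempty norm r.toNat = true by
              rw [pvColNonempty, hall]; rfl, if_pos rfl, List.filter_nil]]
      rw [hsplit, if_neg (by simp), List.getLastD_concat]
      omega

-- ===== VERDICT (by name: the statement is the Claim_ definition above) =====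
theorem trim_empty_edge_columns_spec : Claim_equal_trim_empty_edge_columns := by
  intro rows _
  unfold Spec_trim_empty_edge_columns
  by_cases hr : rows = []
  · rw [trim_empty_edge_columns, trim_empty_edge_columns_alt, if_pos hr, if_pos hr]
  · simp only [trim_empty_edge_columns, trim_empty_edge_columns_alt, if_neg hr]
    set cc := (rows.map List.length).foldl Nat.max 0 with hcc
    set norm := rows.map (fun row => row ++ List.replicate (cc - row.length) "") with hnorm
    have hB : (fun j => norm.any (fun row => row.getD j "" != "")) = pvColNonempty norm :=
      funext (fun j => by rw [pvAny_eq_not_all]; rfl)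
    rw [hB]
    have hLspec : pvFindLeft norm cc 0
        = ((List.range cc).filter (pvColNonempty norm)).headD cc := by
      rw [pvFindLeft_spec norm cc 0 (Nat.zero_le cc), Nat.sub_zero, ← List.range_eq_range']
    cases hi : (List.range cc).filter (pvColNonempty norm) with
    | nil =>
      have hL2 : pvFindLeft norm cc 0 = cc := by rw [hLspec, hi]; rfl
      have hR : pvFindRight norm (pvFindLeft norm cc 0) ((cc : Int) - 1) = (cc : Int) - 1 := by
        rw [hL2, pvFindRight_spec norm cc ((cc : Int) - 1) (by omega)]
        rw [show ((cc : Int) - 1 + 1 - cc).toNat = 0 by omega]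
        have h0 : (List.range' cc 0).filter (pvColNonempty norm) = [] := rfl
        rw [h0, if_pos rfl]
      rw [hR, hL2, if_pos (by omega)]
    | cons j rest =>
      have hL2 : pvFindLeft norm cc 0 = j := by rw [hLspec, hi]; rfl
      have hjcc : j < cc := by
        have hjm : j ∈ (List.range cc).filter (pvColNonempty norm) := by
          rw [hi]; exact List.mem_cons_self
        exact List.mem_range.mp (List.mem_of_mem_filter hjm)
      have hsplit : List.range cc = List.range' 0 j ++ List.range' j (cc - j) := by
        rw [List.range_eq_range']
        have h := @List.range'_append 0 j (cc - j) 1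
        simp only [Nat.one_mul, Nat.zero_add] at h
        rw [show j + (cc - j) = cc by omega] at h
        exact h.symm
      have hcomb : (List.range' 0 j).filter (pvColNonempty norm)
          ++ (List.range' j (cc - j)).filter (pvColNonempty norm) = j :: rest := by
        rw [← List.filter_append, ← hsplit, hi]
      have hpre : (List.range' 0 j).filter (pvColNonempty norm) = [] := by
        cases hcp : (List.range' 0 j).filter (pvColNonempty norm) with
        | nil => rfl
        | cons k ks =>
          exfalso
          have hk : k ∈ (List.range' 0 j).filter (pvColNonempty norm) := by
            rw [hcp]; exact List.mem_cons_self
          have hklt : k < j := by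
            have h1 := List.mem_range'_1.mp (List.mem_of_mem_filter hk)
            omega
          rw [hcp] at hcomb
          have hkj : k = j := (List.cons_eq_cons.mp hcomb).1
          omega
      have hsuf : (List.range' j (cc - j)).filter (pvColNonempty norm) = j :: rest := by
        rw [hpre] at hcomb
        simpa using hcomb
      have hR : pvFindRight norm (pvFindLeft norm cc 0) ((cc : Int) - 1)
          = (((j :: rest).getLastD 0 : Nat) : Int) := by
        rw [hL2, pvFindRight_spec norm j ((cc : Int) - 1) (by omega)]
        rw [show ((cc : Int) - 1 + 1 - j).toNat = cc - j by omega, hsuf, if_neg (by simp)]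
      have hsorted : (j :: rest).Pairwise (· < ·) := by
        rw [← hi]; exact (List.pairwise_lt_range).filter _
      have hgeL : j ≤ (j :: rest).getLastD 0 := by
        rw [List.getLastD_cons]
        rcases List.mem_cons.mp (List.getLastD_mem_cons (l := rest) (a := j)) with heq | hmem
        · omega
        · exact Nat.le_of_lt ((List.pairwise_cons.mp hsorted).1 _ hmem)
      rw [hR, hL2, if_neg (by omega)]
      simp only [List.getLastD_cons]
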